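-- pv_equiv track=rewrite | github.com/iRewiewer/PiGames | games/2048.py | compress_line
-- ===== SOURCE A (Python) =====
-- def compress_line(line):
--     """Left-compress + merge once per pair; returns (new_line, moved, gained_score)."""
--     xs = [x for x in line if x]
--     out, i, gained = [], 0, 0
--     while i < len(xs):
--         if i + 1 < len(xs) and xs[i] == xs[i + 1]:
--             v = xs[i] * 2
--             out.append(v)
--             gained += v
--             i += 2
--         else:
--             out.append(xs[i])
--             i += 1
--     out += [0] * (len(line) - len(out))
--     moved = out != line
--     return out, moved, gained
-- ===== SOURCE B (Python) =====
-- from itertools import groupby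
--
-- def compress_line(line):
--     """Left-compress + merge via run-length groups; returns (new_line, moved, gained_score)."""
--     out, gained = [], 0
--     for v, grp in groupby(x for x in line if x):
--         c = sum(1 for _ in grp)
--         out += [v * 2] * (c // 2)
--         if c % 2:
--             out.append(v)
--         gained += (c // 2) * (v * 2)
--     out += [0] * (len(line) - len(out))
--     return out, out != line, gained
-- ===== Notes on version B (the rewrite author's own statement) =====
-- stated objective: alternative
-- what changed: Replaces the index/lookahead while-loop that greedily merges adjacent equal pairs with a run-length pass (itertools.groupby): each maximal run of c equal values v contributes c//2 merged tiles v*2 plus one leftover v if c is odd, and (c//2)*(v*2) score.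
import Mathlib
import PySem

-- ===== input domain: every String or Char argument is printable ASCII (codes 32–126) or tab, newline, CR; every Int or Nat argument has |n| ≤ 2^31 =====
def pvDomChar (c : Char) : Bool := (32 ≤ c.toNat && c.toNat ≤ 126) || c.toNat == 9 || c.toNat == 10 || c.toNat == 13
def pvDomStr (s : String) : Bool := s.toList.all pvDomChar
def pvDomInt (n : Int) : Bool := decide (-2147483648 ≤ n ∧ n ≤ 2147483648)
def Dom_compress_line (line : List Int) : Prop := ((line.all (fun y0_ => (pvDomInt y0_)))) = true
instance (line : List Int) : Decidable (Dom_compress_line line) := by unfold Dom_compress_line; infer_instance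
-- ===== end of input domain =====

-- B replaces A's index/lookahead greedy pair-merge loop with a run-length (groupby) pass; alternative decomposition, same cost.


-- ===== PORT A =====
-- the while-loop of A: at index i, merge xs[i] with xs[i+1] when equal (consume two), else emit xs[i] (consume one)
def aLoop : List Int → List Int × Int
  | [] => ([], 0)
  | [a] => ([a], 0)
  | a :: b :: rest =>
    if a = b then
      let p := aLoop rest
      (a * 2 :: p.1, a * 2 + p.2)
    else
      let p := aLoop (b :: rest)
      (a :: p.1, p.2)

def compress_line (line : List Int) : List Int × Bool × Int :=
  let xs := line.filter (fun x => x ≠ 0)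
  let p := aLoop xs
  let out := p.1 ++ List.replicate (line.length - p.1.length) 0
  (out, decide (out ≠ line), p.2)

-- ===== PORT B =====
-- itertools.groupby on the zero-filtered list: maximal runs of equal values, as (value, run length)
def bRuns : List Int → List (Int × Nat)
  | [] => []
  | x :: xs =>
    let s := xs.span (fun y => y == x)
    (x, s.1.length + 1) :: bRuns s.2
termination_by l => l.length
decreasing_by
  simp only [List.span_eq_takeWhile_dropWhile]
  have := List.length_dropWhile_le (p := fun y => y == x) (l := xs)
  simp only [List.length_cons]; omega

def compress_line_alt (line : List Int) : List Int × Bool × Int :=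
  let xs := line.filter (fun x => x ≠ 0)
  let p := (bRuns xs).foldl
    (fun (s : List Int × Int) (g : Int × Nat) =>
      (s.1 ++ List.replicate (g.2 / 2) (g.1 * 2) ++ (if g.2 % 2 = 1 then [g.1] else []),
       s.2 + ((g.2 / 2 : Nat) : Int) * (g.1 * 2)))
    ([], 0)
  let out := p.1 ++ List.replicate (line.length - p.1.length) 0
  (out, decide (out ≠ line), p.2)

-- ===== PRECONDITION & SPEC =====
def Spec_compress_line (line : List Int) (out : List Int × Bool × Int) : Prop := out = compress_line_alt line
instance (line : List Int) (out : List Int × Bool × Int) : Decidable (Spec_compress_line line out) := by unfold Spec_compress_line; infer_instance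

-- ===== CLAIM (what is proved, stated in full; the proofs are below) =====
def Claim_equal_compress_line : Prop := ∀ (line : List Int), Dom_compress_line line → Spec_compress_line line (compress_line line)

-- ===== LEMMAS AND PROOFS =====

-- right-nested (recursive) form of B's group processing
def bProc : List (Int × Nat) → List Int × Int
  | [] => ([], 0)
  | g :: t =>
    let p := bProc t
    (List.replicate (g.2 / 2) (g.1 * 2) ++ (if g.2 % 2 = 1 then [g.1] else []) ++ p.1,
     ((g.2 / 2 : Nat) : Int) * (g.1 * 2) + p.2)

-- B's foldl equals the recursive form, up to the accumulator
theorem bFold_eq (rs : List (Int × Nat)) (o : List Int) (g : Int) :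
    rs.foldl
      (fun (s : List Int × Int) (g : Int × Nat) =>
        (s.1 ++ List.replicate (g.2 / 2) (g.1 * 2) ++ (if g.2 % 2 = 1 then [g.1] else []),
         s.2 + ((g.2 / 2 : Nat) : Int) * (g.1 * 2)))
      (o, g) = (o ++ (bProc rs).1, g + (bProc rs).2) := by
  induction rs generalizing o g with
  | nil => simp [bProc]
  | cons h t ih =>
    simp only [List.foldl_cons]
    rw [ih]
    simp only [bProc]
    refine Prod.ext_iff.mpr ⟨?_, ?_⟩
    · simp [List.append_assoc]
    · push_cast; ring

-- A's greedy pair loop on a run of c copies of v, followed by a rest not starting with v,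
-- produces c/2 merged tiles, an odd leftover, and (c/2)*(2v) score — B's per-group rule.
theorem aLoop_run (v : Int) (c : Nat) (rest : List Int)
    (hrest : ∀ b t, rest = b :: t → b ≠ v) :
    aLoop (List.replicate c v ++ rest) =
      (List.replicate (c / 2) (v * 2) ++ (if c % 2 = 1 then [v] else []) ++ (aLoop rest).1,
       ((c / 2 : Nat) : Int) * (v * 2) + (aLoop rest).2) := by
  induction c using Nat.strong_induction_on with
  | _ c ih =>
    match c with
    | 0 => simp
    | 1 =>
      cases rest with
      | nil => simp [aLoop]
      | cons b t =>
        have hb : ¬ (v = b) := fun h => hrest b t rfl h.symm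
        simp [aLoop, hb]
    | c + 2 =>
      have hrep : List.replicate (c + 2) v ++ rest = v :: v :: (List.replicate c v ++ rest) := by
        simp [List.replicate_succ]
      rw [hrep]
      rw [show aLoop (v :: v :: (List.replicate c v ++ rest)) =
            (v * 2 :: (aLoop (List.replicate c v ++ rest)).1,
             v * 2 + (aLoop (List.replicate c v ++ rest)).2) from by simp [aLoop]]
      rw [ih c (by omega)]
      have h1 : (c + 2) / 2 = c / 2 + 1 := by omega
      have h2 : (c + 2) % 2 = c % 2 := by omega
      refine Prod.ext_iff.mpr ⟨?_, ?_⟩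
      · simp [h1, h2, List.replicate_succ]
      · simp only [h1]; push_cast; ring

-- A's loop over the whole zero-filtered list equals B's group-by-group processing
theorem aLoop_eq_bProc (xs : List Int) : aLoop xs = bProc (bRuns xs) := by
  induction hn : xs.length using Nat.strong_induction_on generalizing xs with
  | _ n ih =>
    cases xs with
    | nil => simp [aLoop, bRuns, bProc]
    | cons x t =>
      rw [bRuns]
      simp only [List.span_eq_takeWhile_dropWhile]
      have hall : ∀ y ∈ t.takeWhile (fun y => y == x), y = x := by
        intro y hy
        simpa using List.mem_takeWhile_imp hy
      have hxrep : x :: t =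
          List.replicate ((t.takeWhile (fun y => y == x)).length + 1) x
            ++ t.dropWhile (fun y => y == x) := by
        have h1 : t.takeWhile (fun y => y == x)
            = List.replicate (t.takeWhile (fun y => y == x)).length x :=
          List.eq_replicate_of_mem hall
        conv_lhs => rw [show t = t.takeWhile (fun y => y == x) ++ t.dropWhile (fun y => y == x)
          from (List.takeWhile_append_dropWhile).symm]
        rw [List.replicate_succ, List.cons_append]
        congr 1
        conv_lhs => rw [h1]
      have hrest : ∀ b u, t.dropWhile (fun y => y == x) = b :: u → b ≠ x := by
        intro b u hb
        have := List.head?_dropWhile_not (p := fun y => y == x) (l := t)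
        rw [hb] at this
        simpa using this
      have hlen : (t.dropWhile (fun y => y == x)).length < n := by
        have := List.length_dropWhile_le (p := fun y => y == x) (l := t)
        subst hn
        simp only [List.length_cons]
        omega
      rw [hxrep, aLoop_run x _ _ hrest, bProc,
        ih (t.dropWhile (fun y => y == x)).length hlen _ rfl]

-- ===== VERDICT (by name: the statement is the Claim_ definition above) =====
theorem compress_line_spec : Claim_equal_compress_line := by
  intro line _
  show compress_line line = compress_line_alt line
  simp only [compress_line, compress_line_alt, bFold_eq, List.nil_append,
    aLoop_eq_bProc, zero_add]
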